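-- pv_equiv track=rewrite | github.com/qwertyu63/Sinking-Ship | sinking_ship.py | run_counter
-- ===== SOURCE A (Python) =====
-- def run_counter(counts):
--     streak = 0
--     array = []
--     for item in counts:
--         if item == 0:
--             array.append(streak)
--             streak = 0
--         else:
--             streak += 1
--     array.append(streak)
--     return max(array)
-- ===== SOURCE B (Python) =====
-- def run_counter(counts):
--     zeros = [-1] + [i for i, x in enumerate(counts) if x == 0] + [len(counts)]
--     return max(b - a - 1 for a, b in zip(zeros, zeros[1:]))
-- ===== Notes on version B (the rewrite author's own statement) =====
-- stated objective: alternative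
-- what changed: Instead of A's streak accumulator appending run lengths, B records the positions of the zeros (with -1 and len(counts) as sentinels) and returns the maximum gap between consecutive zero positions minus one.
import Mathlib
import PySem

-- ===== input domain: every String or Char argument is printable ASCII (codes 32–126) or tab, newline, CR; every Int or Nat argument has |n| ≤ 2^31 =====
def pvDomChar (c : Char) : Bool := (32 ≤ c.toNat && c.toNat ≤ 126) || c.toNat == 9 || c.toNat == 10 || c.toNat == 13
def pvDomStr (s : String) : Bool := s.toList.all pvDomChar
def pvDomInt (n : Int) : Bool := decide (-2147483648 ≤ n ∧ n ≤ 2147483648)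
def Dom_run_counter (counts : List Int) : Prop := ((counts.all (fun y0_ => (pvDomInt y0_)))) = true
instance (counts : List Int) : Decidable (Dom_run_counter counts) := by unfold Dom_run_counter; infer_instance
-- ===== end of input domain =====

-- B replaces A's streak-accumulator loop by a zero-position/maximum-gap computation (sentinels -1 and len); alternative algorithm, same return value.


-- ===== PORT A =====
-- the for-loop over counts carrying (streak, array); then array.append(streak); max(array).
-- `array ++ [streak]` is always nonempty, so Python's `max` never raises; the `.getD 0` is unreachable.
def run_counter (counts : List Int) : Int :=
  let st := counts.foldl
    (fun (s : Int × List Int) item =>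
      if item = 0 then (0, s.2 ++ [s.1]) else (s.1 + 1, s.2))
    (0, [])
  (PySem.List.max? (st.2 ++ [st.1]) (fun y => y)).getD 0

-- ===== PORT B =====
-- zeros = [-1] + [i for i, x in enumerate(counts) if x == 0] + [len(counts)];
-- max over b - a - 1 for consecutive (a, b) in zip(zeros, zeros[1:]).
-- zeros has ≥ 2 elements so the gap list is nonempty and Python's `max` never raises; `.getD 0` unreachable.
def run_counter_alt (counts : List Int) : Int :=
  let zeros : List Int :=
    -1 :: ((PySem.List.enumerate counts 0).filterMap
            (fun p => if p.2 = 0 then some p.1 else none))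
      ++ [(counts.length : Int)]
  let gaps := (zeros.zip zeros.tail).map (fun p => p.2 - p.1 - 1)
  (PySem.List.max? gaps (fun y => y)).getD 0

-- ===== PRECONDITION & SPEC =====
def Spec_run_counter (counts : List Int) (out : Int) : Prop := out = run_counter_alt counts
instance (counts : List Int) (out : Int) : Decidable (Spec_run_counter counts out) := by unfold Spec_run_counter; infer_instance

-- ===== CLAIM (what is proved, stated in full; the proofs are below) =====
def Claim_equal_run_counter : Prop := ∀ (counts : List Int), Dom_run_counter counts → Spec_run_counter counts (run_counter counts)

-- ===== LEMMAS AND PROOFS =====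

-- A's loop: the completed-runs list and final streak, as functions of the start streak
def pvRuns : List Int → Int → List Int
  | [], _ => []
  | x :: xs, s => if x = 0 then s :: pvRuns xs 0 else pvRuns xs (s + 1)

def pvStreak : List Int → Int → Int
  | [], s => s
  | x :: xs, s => if x = 0 then pvStreak xs 0 else pvStreak xs (s + 1)

theorem pv_foldA (l : List Int) : ∀ (s : Int) (arr : List Int),
    l.foldl (fun (st : Int × List Int) item =>
      if item = 0 then (0, st.2 ++ [st.1]) else (st.1 + 1, st.2)) (s, arr)
    = (pvStreak l s, arr ++ pvRuns l s) := by
  induction l with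
  | nil => intro s arr; simp [pvStreak, pvRuns]
  | cons x xs ih =>
    intro s arr
    by_cases hx : x = 0
    · simp [List.foldl_cons, hx, pvStreak, pvRuns, ih]
    · simp [List.foldl_cons, hx, pvStreak, pvRuns, ih]

-- B's zero-index list, from start index i
def pvZeroIdx : List Int → Int → List Int
  | [], _ => []
  | x :: xs, i => if x = 0 then i :: pvZeroIdx xs (i + 1) else pvZeroIdx xs (i + 1)

theorem pv_enum_filter (l : List Int) : ∀ (i : Int),
    (PySem.List.enumerate l i).filterMap (fun p => if p.2 = 0 then some p.1 else none)
      = pvZeroIdx l i := by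
  induction l with
  | nil => intro i; simp [PySem.List.enumerate_nil, pvZeroIdx]
  | cons x xs ih =>
    intro i
    by_cases hx : x = 0
    · simp [PySem.List.enumerate_cons, List.filterMap_cons, hx, pvZeroIdx, ih]
    · simp [PySem.List.enumerate_cons, List.filterMap_cons, hx, pvZeroIdx, ih]

-- adjacent differences minus one
def pvAdjGaps : List Int → List Int
  | a :: b :: rest => (b - a - 1) :: pvAdjGaps (b :: rest)
  | _ => []

theorem pv_zip_tail (l : List Int) :
    (l.zip l.tail).map (fun p : Int × Int => p.2 - p.1 - 1) = pvAdjGaps l := by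
  induction l with
  | nil => simp [pvAdjGaps]
  | cons a t ih =>
    cases t with
    | nil => simp [pvAdjGaps]
    | cons b r => simpa [pvAdjGaps] using ih

-- key lemma: gaps of (p :: zero-indices ++ [end]) are exactly A's run lengths
theorem pv_gaps_eq (l : List Int) : ∀ (i p : Int),
    pvAdjGaps ((p :: pvZeroIdx l i) ++ [i + (l.length : Int)])
      = pvRuns l (i - p - 1) ++ [pvStreak l (i - p - 1)] := by
  induction l with
  | nil => intro i p; simp [pvZeroIdx, pvAdjGaps, pvRuns, pvStreak]
  | cons x xs ih =>
    intro i p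
    by_cases hx : x = 0
    · have h := ih (i + 1) i
      simp only [pvZeroIdx, pvRuns, pvStreak, hx, if_pos]
      have : i + 1 - i - 1 = (0 : Int) := by ring
      rw [this] at h
      simp only [List.cons_append, pvAdjGaps]
      have hlen : i + 1 + (xs.length : Int) = i + ((xs.length : Int) + 1) := by ring
      rw [hlen] at h
      simp only [List.length_cons]
      push_cast
      rw [show i + ((xs.length : Int) + 1) = i + (xs.length : Int) + 1 by ring] at h ⊢
      exact congrArg (List.cons (i - p - 1)) h
    · have h := ih (i + 1) p
      simp only [pvZeroIdx, pvRuns, pvStreak, if_neg hx]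
      have : i + 1 - p - 1 = i - p - 1 + 1 := by ring
      rw [this] at h
      simp only [List.length_cons]
      push_cast
      rw [show i + ((xs.length : Int) + 1) = i + 1 + (xs.length : Int) by ring]
      exact h

-- ===== VERDICT (by name: the statement is the Claim_ definition above) =====
theorem run_counter_spec : Claim_equal_run_counter := by
  intro counts _
  unfold Spec_run_counter run_counter run_counter_alt
  rw [pv_foldA counts 0 []]
  simp only [List.nil_append]
  rw [pv_enum_filter counts 0, pv_zip_tail]
  have h := pv_gaps_eq counts 0 (-1)
  have h0 : (0 : Int) - (-1) - 1 = 0 := by ring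
  rw [h0] at h
  simp only [zero_add] at h
  rw [h]
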